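-- pv_equiv track=rewrite | github.com/josedab/genesis | genesis/llm_inference.py | _infer_domain
-- ===== SOURCE A (Python) =====
-- from typing import Any, Dict, List, Optional
--
-- def _infer_domain(columns: Dict[str, Dict[str, Any]]) -> str:
--     """Infer data domain from column types."""
--     types = [c.get("inferred_type", "") for c in columns.values()]
--     descriptions = " ".join(c.get("description", "") for c in columns.values()).lower()
--
--     if (
--         any(t in ["diagnosis", "patient", "medical"] for t in types)
--         or "medical" in descriptions
--         or "patient" in descriptions
--     ):
--         return "healthcare"
--
--     if (
--         any(t in ["price", "amount", "currency"] for t in types)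
--         or "price" in descriptions
--         or "transaction" in descriptions
--     ):
--         return "finance"
--
--     if "product" in descriptions or "order" in descriptions:
--         return "retail"
--
--     if "user" in descriptions or "customer" in descriptions:
--         return "customer"
--
--     return "general"
-- ===== SOURCE B (Python) =====
-- _ORDER = ["healthcare", "finance", "retail", "customer", "general"]
--
--
-- def _col_priority(col):
--     """Priority (index into _ORDER) signalled by ONE column on its own."""
--     t = col.get("inferred_type", "")
--     d = col.get("description", "").lower()
--     if t in ("diagnosis", "patient", "medical") or "medical" in d or "patient" in d:
--         return 0
--     if t in ("price", "amount", "currency") or "price" in d or "transaction" in d: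
--         return 1
--     if "product" in d or "order" in d:
--         return 2
--     if "user" in d or "customer" in d:
--         return 3
--     return 4
--
--
-- def _infer_domain(columns):
--     """Classify each column independently and return the highest-priority domain seen.
--
--     Equivalent to the global joined-description cascade because no keyword
--     contains a space: a keyword occurs in the space-joined description string
--     iff it occurs in some single column's description."""
--     best = 4
--     for col in columns.values():
--         best = min(best, _col_priority(col))
--     return _ORDER[best]
-- ===== Notes on version B (the rewrite author's own statement) =====
-- stated objective: alternative
-- what changed: Instead of joining all descriptions into one global string and running a four-guard cascade over aggregate checks, B classifies each column independently to a priority and aggregates with a single min-fold, indexing an ordered domain table; correct because no keyword contains a space, so a keyword is in the joined string iff it is in some single description.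
import Mathlib
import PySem

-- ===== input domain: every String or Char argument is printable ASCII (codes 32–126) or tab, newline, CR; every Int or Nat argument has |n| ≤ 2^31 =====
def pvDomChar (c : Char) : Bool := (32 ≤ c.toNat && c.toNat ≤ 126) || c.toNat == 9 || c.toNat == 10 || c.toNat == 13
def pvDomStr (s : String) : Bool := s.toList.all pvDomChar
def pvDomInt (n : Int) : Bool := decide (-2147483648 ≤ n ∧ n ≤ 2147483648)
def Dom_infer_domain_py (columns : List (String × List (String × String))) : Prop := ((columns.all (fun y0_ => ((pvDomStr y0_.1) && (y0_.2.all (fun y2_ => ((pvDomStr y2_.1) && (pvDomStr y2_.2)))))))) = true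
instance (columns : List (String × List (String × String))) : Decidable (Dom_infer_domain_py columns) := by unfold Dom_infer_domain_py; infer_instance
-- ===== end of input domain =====

-- B replaces A's joined-description cascade by an independent per-column classification
-- aggregated with a min-priority fold over an ordered domain table (objective: alternative).
-- ===== PORT A =====
-- dict.get(k, dflt) on an association list: first match, else default
def pvGetD (d : List (String × String)) (k dflt : String) : String :=
  match d with
  | [] => dflt
  | (k', v) :: rest => if k' == k then v else pvGetD rest k dflt

def infer_domain_py (columns : List (String × List (String × String))) : String :=
  let types := columns.map (fun kv => pvGetD kv.2 "inferred_type" "")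
  let descriptions := PySem.Str.lower (PySem.Str.join " " (columns.map (fun kv => pvGetD kv.2 "description" "")))
  if types.any (fun t => (["diagnosis", "patient", "medical"] : List String).contains t)
      || PySem.Str.isIn "medical" descriptions || PySem.Str.isIn "patient" descriptions then
    "healthcare"
  else if types.any (fun t => (["price", "amount", "currency"] : List String).contains t)
      || PySem.Str.isIn "price" descriptions || PySem.Str.isIn "transaction" descriptions then
    "finance"
  else if PySem.Str.isIn "product" descriptions || PySem.Str.isIn "order" descriptions then
    "retail"
  else if PySem.Str.isIn "user" descriptions || PySem.Str.isIn "customer" descriptions then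
    "customer"
  else
    "general"

-- ===== PORT B =====
def pvOrder : List String := ["healthcare", "finance", "retail", "customer", "general"]

-- priority (index into pvOrder) signalled by one column on its own
def pvColPriority (col : List (String × String)) : Int :=
  if (["diagnosis", "patient", "medical"] : List String).contains (pvGetD col "inferred_type" "")
      || PySem.Str.isIn "medical" (PySem.Str.lower (pvGetD col "description" ""))
      || PySem.Str.isIn "patient" (PySem.Str.lower (pvGetD col "description" "")) then 0
  else if (["price", "amount", "currency"] : List String).contains (pvGetD col "inferred_type" "")
      || PySem.Str.isIn "price" (PySem.Str.lower (pvGetD col "description" ""))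
      || PySem.Str.isIn "transaction" (PySem.Str.lower (pvGetD col "description" "")) then 1
  else if PySem.Str.isIn "product" (PySem.Str.lower (pvGetD col "description" ""))
      || PySem.Str.isIn "order" (PySem.Str.lower (pvGetD col "description" "")) then 2
  else if PySem.Str.isIn "user" (PySem.Str.lower (pvGetD col "description" ""))
      || PySem.Str.isIn "customer" (PySem.Str.lower (pvGetD col "description" "")) then 3
  else 4

def infer_domain_py_alt (columns : List (String × List (String × String))) : String :=
  let best := columns.foldl (fun b kv => min b (pvColPriority kv.2)) 4
  -- _ORDER[best]: best is always in 0..4, so the .getD default is never used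
  (PySem.List.pyGet? pvOrder best).getD ""

-- ===== PRECONDITION & SPEC =====
def Spec_infer_domain_py (columns : List (String × List (String × String))) (out : String) : Prop := out = infer_domain_py_alt columns
instance (columns : List (String × List (String × String))) (out : String) : Decidable (Spec_infer_domain_py columns out) := by unfold Spec_infer_domain_py; infer_instance

-- ===== CLAIM (what is proved, stated in full; the proofs are below) =====
def Claim_equal_infer_domain_py : Prop := ∀ (columns : List (String × List (String × String))), Dom_infer_domain_py columns → Spec_infer_domain_py columns (infer_domain_py columns)

-- ===== LEMMAS AND PROOFS =====

-- per-column guard conditions (proof-only abbreviations)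
def pvS0 (col : List (String × String)) : Bool :=
  (["diagnosis", "patient", "medical"] : List String).contains (pvGetD col "inferred_type" "")
    || PySem.Str.isIn "medical" (PySem.Str.lower (pvGetD col "description" ""))
    || PySem.Str.isIn "patient" (PySem.Str.lower (pvGetD col "description" ""))
def pvS1 (col : List (String × String)) : Bool :=
  (["price", "amount", "currency"] : List String).contains (pvGetD col "inferred_type" "")
    || PySem.Str.isIn "price" (PySem.Str.lower (pvGetD col "description" ""))
    || PySem.Str.isIn "transaction" (PySem.Str.lower (pvGetD col "description" ""))
def pvS2 (col : List (String × String)) : Bool :=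
  PySem.Str.isIn "product" (PySem.Str.lower (pvGetD col "description" ""))
    || PySem.Str.isIn "order" (PySem.Str.lower (pvGetD col "description" ""))
def pvS3 (col : List (String × String)) : Bool :=
  PySem.Str.isIn "user" (PySem.Str.lower (pvGetD col "description" ""))
    || PySem.Str.isIn "customer" (PySem.Str.lower (pvGetD col "description" ""))

-- a spaceless word is a prefix of a ++ ' ' :: b iff it is a prefix of a
theorem pv_prefix_sep (w a b : List Char) (hw : ' ' ∉ w) :
    w <+: a ++ ' ' :: b ↔ w <+: a := by
  induction a generalizing w with
  | nil =>
    cases w with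
    | nil => simp
    | cons c w' =>
      simp only [List.nil_append, List.cons_prefix_cons, List.prefix_nil]
      constructor
      · rintro ⟨rfl, -⟩; exact absurd (List.mem_cons_self) hw
      · rintro ⟨⟩
  | cons x a' ih =>
    cases w with
    | nil => simp
    | cons c w' =>
      simp only [List.cons_append, List.cons_prefix_cons]
      have := ih (w := w') (by intro h; exact hw (List.mem_cons_of_mem _ h))
      tauto

-- a nonempty spaceless word is an infix of a ++ ' ' :: b iff it is an infix of a or of b
theorem pv_infix_sep (w a b : List Char) (hw : ' ' ∉ w) (hne : w ≠ []) :
    w <:+: a ++ ' ' :: b ↔ w <:+: a ∨ w <:+: b := by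
  induction a with
  | nil =>
    simp only [List.nil_append, List.infix_cons_iff, List.infix_nil]
    constructor
    · rintro (hp | hi)
      · exfalso
        cases w with
        | nil => exact hne rfl
        | cons c w' =>
          rcases List.cons_prefix_cons.mp hp with ⟨rfl, -⟩
          exact hw List.mem_cons_self
      · exact Or.inr hi
    · rintro (rfl | hb)
      · exact absurd rfl hne
      · exact Or.inr hb
  | cons x a' ih =>
    have hp : w <+: x :: (a' ++ ' ' :: b) ↔ w <+: x :: a' := by
      rw [← List.cons_append]; exact pv_prefix_sep w (x :: a') b hw
    rw [List.cons_append, List.infix_cons_iff, ih, hp, List.infix_cons_iff]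
    tauto

-- 'w in join " " qs' scans the pieces when w is nonempty and spaceless
theorem pv_isIn_join (w : List Char) (hw : ' ' ∉ w) (hne : w ≠ []) :
    ∀ qs : List (List Char),
      PySem.Chars.isIn w (PySem.Chars.join [' '] qs) = qs.any (fun q => PySem.Chars.isIn w q) := by
  intro qs
  induction qs with
  | nil =>
    rw [PySem.Chars.join_nil, List.any_nil, PySem.Chars.isIn_eq_false_iff, List.infix_nil]
    exact hne
  | cons q qs ih =>
    cases qs with
    | nil => rw [PySem.Chars.join_singleton]; simp
    | cons q' rest =>
      rw [PySem.Chars.join_cons_cons, List.append_assoc, List.singleton_append,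
        Bool.eq_iff_iff, PySem.Chars.isIn_iff_infix, pv_infix_sep w q _ hw hne]
      simp only [← PySem.Chars.isIn_iff_infix, ih, List.any_cons, Bool.or_eq_true]

-- lower distributes over the space-join (lowerChar ' ' = ' ')
theorem pv_lower_join : ∀ ps : List (List Char),
    PySem.Chars.lower (PySem.Chars.join [' '] ps) = PySem.Chars.join [' '] (ps.map PySem.Chars.lower)
  | [] => by rw [PySem.Chars.join_nil]; rfl
  | [p] => by rw [List.map_singleton, PySem.Chars.join_singleton, PySem.Chars.join_singleton]
  | p :: q :: rest => by
    rw [List.map_cons, List.map_cons, PySem.Chars.join_cons_cons, PySem.Chars.join_cons_cons,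
      ← List.map_cons, ← pv_lower_join (q :: rest)]
    simp only [PySem.Chars.lower, List.map_append, List.map_cons, List.map_nil,
      show PySem.Chars.lowerChar ' ' = ' ' from by decide]

-- the Str-level consequence: 'w in lower(" ".join(xs))' = any column description contains w
theorem pv_isIn_lower_join (w : String) (hw : ' ' ∉ w.toList) (hne : w.toList ≠ [])
    (xs : List String) :
    PySem.Str.isIn w (PySem.Str.lower (PySem.Str.join " " xs))
      = xs.any (fun x => PySem.Str.isIn w (PySem.Str.lower x)) := by
  have hsep : (" " : String).toList = [' '] := by decide
  simp only [PySem.Str.isIn_eq, PySem.Str.toList_lower, PySem.Str.toList_join, hsep]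
  rw [pv_lower_join, List.map_map, pv_isIn_join w.toList hw hne, List.any_map]
  rfl

-- fold two any's into one
theorem pv_any_or2 {α : Type} (l : List α) (g h : α → Bool) :
    (l.any g || l.any h) = l.any (fun x => g x || h x) := by
  induction l with
  | nil => simp
  | cons a l ih =>
    simp only [List.any_cons, ← ih]
    cases g a <;> cases h a <;> simp

-- A rewritten as a cascade over per-column any's
set_option maxHeartbeats 2000000 in
theorem pv_A_char (columns : List (String × List (String × String))) :
    infer_domain_py columns =
      (if columns.any (fun kv => pvS0 kv.2) then "healthcare"
       else if columns.any (fun kv => pvS1 kv.2) then "finance"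
       else if columns.any (fun kv => pvS2 kv.2) then "retail"
       else if columns.any (fun kv => pvS3 kv.2) then "customer"
       else "general") := by
  unfold infer_domain_py
  simp only [pv_isIn_lower_join "medical" (by decide) (by decide),
    pv_isIn_lower_join "patient" (by decide) (by decide),
    pv_isIn_lower_join "price" (by decide) (by decide),
    pv_isIn_lower_join "transaction" (by decide) (by decide),
    pv_isIn_lower_join "product" (by decide) (by decide),
    pv_isIn_lower_join "order" (by decide) (by decide),
    pv_isIn_lower_join "user" (by decide) (by decide),
    pv_isIn_lower_join "customer" (by decide) (by decide),
    List.any_map, pv_any_or2]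
  rfl

-- the recursive (foldr) form of B's minimum
def pvM (columns : List (String × List (String × String))) : Int :=
  columns.foldr (fun kv r => min (pvColPriority kv.2) r) 4

theorem pv_pc_nonneg (col : List (String × String)) : 0 ≤ pvColPriority col := by
  unfold pvColPriority; split_ifs <;> norm_num

theorem pv_pc_le_four (col : List (String × String)) : pvColPriority col ≤ 4 := by
  unfold pvColPriority; split_ifs <;> norm_num

theorem pv_M_nonneg (columns : List (String × List (String × String))) : 0 ≤ pvM columns := by
  induction columns with
  | nil => norm_num [pvM]
  | cons c cs ih =>
    simp only [pvM, List.foldr_cons] at *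
    exact le_min (pv_pc_nonneg c.2) ih

theorem pv_M_le_four (columns : List (String × List (String × String))) : pvM columns ≤ 4 := by
  cases columns with
  | nil => norm_num [pvM]
  | cons c cs =>
    simp only [pvM, List.foldr_cons]
    exact le_trans (min_le_left _ _) (pv_pc_le_four c.2)

theorem pv_foldl_min (columns : List (String × List (String × String))) :
    ∀ b : Int, b ≤ 4 →
      columns.foldl (fun b kv => min b (pvColPriority kv.2)) b = min b (pvM columns) := by
  induction columns with
  | nil => intro b hb; simp [pvM, min_eq_left hb]
  | cons c cs ih =>
    intro b hb
    simp only [List.foldl_cons]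
    rw [ih (min b (pvColPriority c.2)) (le_trans (min_le_left _ _) hb)]
    simp only [pvM, List.foldr_cons, min_assoc]

theorem pv_M_le_iff (k : Int) (hk : k < 4) (columns : List (String × List (String × String))) :
    pvM columns ≤ k ↔ ∃ kv ∈ columns, pvColPriority kv.2 ≤ k := by
  induction columns with
  | nil =>
    simp only [pvM, List.foldr_nil]
    constructor
    · intro h; omega
    · rintro ⟨kv, hm, -⟩; simp at hm
  | cons c cs ih =>
    simp only [pvM, List.foldr_cons, min_le_iff, List.mem_cons]
    rw [show (cs.foldr (fun kv r => min (pvColPriority kv.2) r) 4) = pvM cs from rfl, ih]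
    constructor
    · rintro (h | ⟨kv, hm, hle⟩)
      · exact ⟨c, Or.inl rfl, h⟩
      · exact ⟨kv, Or.inr hm, hle⟩
    · rintro ⟨kv, (rfl | hm), hle⟩
      · exact Or.inl hle
      · exact Or.inr ⟨kv, hm, hle⟩

theorem pv_pc_le0 (col : List (String × String)) : pvColPriority col ≤ 0 ↔ pvS0 col = true := by
  unfold pvColPriority pvS0
  split_ifs with h0 h1 h2 h3 <;>
    [exact iff_of_true (by norm_num) h0;
     exact iff_of_false (by norm_num) (fun h => h0 h);
     exact iff_of_false (by norm_num) (fun h => h0 h);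
     exact iff_of_false (by norm_num) (fun h => h0 h);
     exact iff_of_false (by norm_num) (fun h => h0 h)]

theorem pv_pc_le1 (col : List (String × String)) :
    pvColPriority col ≤ 1 ↔ (pvS0 col = true ∨ pvS1 col = true) := by
  unfold pvColPriority pvS0 pvS1
  split_ifs with h0 h1 h2 h3 <;>
    [exact iff_of_true (by norm_num) (Or.inl h0);
     exact iff_of_true (by norm_num) (Or.inr h1);
     exact iff_of_false (by norm_num) (by rintro (h | h) <;> [exact h0 h; exact h1 h]);
     exact iff_of_false (by norm_num) (by rintro (h | h) <;> [exact h0 h; exact h1 h]);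
     exact iff_of_false (by norm_num) (by rintro (h | h) <;> [exact h0 h; exact h1 h])]

theorem pv_pc_le2 (col : List (String × String)) :
    pvColPriority col ≤ 2 ↔ (pvS0 col = true ∨ pvS1 col = true ∨ pvS2 col = true) := by
  unfold pvColPriority pvS0 pvS1 pvS2
  split_ifs with h0 h1 h2 h3 <;>
    [exact iff_of_true (by norm_num) (Or.inl h0);
     exact iff_of_true (by norm_num) (Or.inr (Or.inl h1));
     exact iff_of_true (by norm_num) (Or.inr (Or.inr h2));
     exact iff_of_false (by norm_num) (by rintro (h | h | h) <;> [exact h0 h; exact h1 h; exact h2 h]);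
     exact iff_of_false (by norm_num) (by rintro (h | h | h) <;> [exact h0 h; exact h1 h; exact h2 h])]

theorem pv_pc_le3 (col : List (String × String)) :
    pvColPriority col ≤ 3 ↔ (pvS0 col = true ∨ pvS1 col = true ∨ pvS2 col = true ∨ pvS3 col = true) := by
  unfold pvColPriority pvS0 pvS1 pvS2 pvS3
  split_ifs with h0 h1 h2 h3 <;>
    [exact iff_of_true (by norm_num) (Or.inl h0);
     exact iff_of_true (by norm_num) (Or.inr (Or.inl h1));
     exact iff_of_true (by norm_num) (Or.inr (Or.inr (Or.inl h2)));
     exact iff_of_true (by norm_num) (Or.inr (Or.inr (Or.inr h3)));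
     exact iff_of_false (by norm_num)
       (by rintro (h | h | h | h) <;> [exact h0 h; exact h1 h; exact h2 h; exact h3 h])]

-- ===== VERDICT (by name: the statement is the Claim_ definition above) =====
theorem infer_domain_py_spec : Claim_equal_infer_domain_py := by
  intro columns _
  unfold Spec_infer_domain_py
  rw [pv_A_char]
  unfold infer_domain_py_alt
  rw [pv_foldl_min columns 4 (le_refl 4), min_eq_right (pv_M_le_four columns)]
  have hM0 := pv_M_nonneg columns
  have hM4 := pv_M_le_four columns
  by_cases h0 : columns.any (fun kv => pvS0 kv.2) = true
  · have : pvM columns ≤ 0 := by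
      rw [pv_M_le_iff 0 (by norm_num)]
      obtain ⟨kv, hm, hs⟩ := List.any_eq_true.mp h0
      exact ⟨kv, hm, (pv_pc_le0 kv.2).mpr hs⟩
    have hM : pvM columns = 0 := le_antisymm this hM0
    rw [hM, h0]; rfl
  · have n0 : ¬ pvM columns ≤ 0 := by
      rw [pv_M_le_iff 0 (by norm_num)]
      rintro ⟨kv, hm, hle⟩
      exact h0 (List.any_eq_true.mpr ⟨kv, hm, (pv_pc_le0 kv.2).mp hle⟩)
    rw [if_neg (by simpa using h0)]
    by_cases h1 : columns.any (fun kv => pvS1 kv.2) = true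
    · have : pvM columns ≤ 1 := by
        rw [pv_M_le_iff 1 (by norm_num)]
        obtain ⟨kv, hm, hs⟩ := List.any_eq_true.mp h1
        exact ⟨kv, hm, (pv_pc_le1 kv.2).mpr (Or.inr hs)⟩
      have hM : pvM columns = 1 := by omega
      rw [hM, if_pos h1]; rfl
    · have n1 : ¬ pvM columns ≤ 1 := by
        rw [pv_M_le_iff 1 (by norm_num)]
        rintro ⟨kv, hm, hle⟩
        rcases (pv_pc_le1 kv.2).mp hle with hs | hs
        · exact h0 (List.any_eq_true.mpr ⟨kv, hm, hs⟩)
        · exact h1 (List.any_eq_true.mpr ⟨kv, hm, hs⟩)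
      rw [if_neg (by simpa using h1)]
      by_cases h2 : columns.any (fun kv => pvS2 kv.2) = true
      · have : pvM columns ≤ 2 := by
          rw [pv_M_le_iff 2 (by norm_num)]
          obtain ⟨kv, hm, hs⟩ := List.any_eq_true.mp h2
          exact ⟨kv, hm, (pv_pc_le2 kv.2).mpr (Or.inr (Or.inr hs))⟩
        have hM : pvM columns = 2 := by omega
        rw [hM, if_pos h2]; rfl
      · have n2 : ¬ pvM columns ≤ 2 := by
          rw [pv_M_le_iff 2 (by norm_num)]
          rintro ⟨kv, hm, hle⟩
          rcases (pv_pc_le2 kv.2).mp hle with hs | hs | hs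
          · exact h0 (List.any_eq_true.mpr ⟨kv, hm, hs⟩)
          · exact h1 (List.any_eq_true.mpr ⟨kv, hm, hs⟩)
          · exact h2 (List.any_eq_true.mpr ⟨kv, hm, hs⟩)
        rw [if_neg (by simpa using h2)]
        by_cases h3 : columns.any (fun kv => pvS3 kv.2) = true
        · have : pvM columns ≤ 3 := by
            rw [pv_M_le_iff 3 (by norm_num)]
            obtain ⟨kv, hm, hs⟩ := List.any_eq_true.mp h3
            exact ⟨kv, hm, (pv_pc_le3 kv.2).mpr (Or.inr (Or.inr (Or.inr hs)))⟩
          have hM : pvM columns = 3 := by omega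
          rw [hM, if_pos h3]; rfl
        · have n3 : ¬ pvM columns ≤ 3 := by
            rw [pv_M_le_iff 3 (by norm_num)]
            rintro ⟨kv, hm, hle⟩
            rcases (pv_pc_le3 kv.2).mp hle with hs | hs | hs | hs
            · exact h0 (List.any_eq_true.mpr ⟨kv, hm, hs⟩)
            · exact h1 (List.any_eq_true.mpr ⟨kv, hm, hs⟩)
            · exact h2 (List.any_eq_true.mpr ⟨kv, hm, hs⟩)
            · exact h3 (List.any_eq_true.mpr ⟨kv, hm, hs⟩)
          have hM : pvM columns = 4 := by omega
          rw [hM, if_neg (by simpa using h3)]; rfl
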